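-- pv_equiv track=rewrite | github.com/duncanka/Causeway | src/data/__init__.py | __get_token_strings
-- ===== SOURCE A (Python) =====
-- def __get_token_strings(tokenized_text, tagged_lemmas):
--     '''
--     This is basically a wrapper for the string split function, which also
--     combines adjacent tokens if there are spaces within tokens. This is
--     detected by looking for a lack of a '/' in the tagged lemma.
--     '''
--     token_strings = tokenized_text.split(' ')
--     lemma_strings = tagged_lemmas.split(' ')
--     assert len(token_strings) == len(lemma_strings), (
--         "Tokens do not match tags")
--
--     if all('/' in lemma for lemma in lemma_strings):
--         return token_strings, lemma_strings
--
--     final_token_strings = []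
--     final_lemma_strings = []
--     tokens_to_accumulate = []
--     lemmas_to_accumulate = []
--     for token, lemma in zip(token_strings, lemma_strings):
--         tokens_to_accumulate.append(token)
--         lemmas_to_accumulate.append(lemma)
--         if '/' in lemma:
--             final_token_strings.append(' '.join(tokens_to_accumulate))
--             final_lemma_strings.append(' '.join(lemmas_to_accumulate))
--             tokens_to_accumulate = []
--             lemmas_to_accumulate = []
--     return final_token_strings, final_lemma_strings
-- ===== SOURCE B (Python) =====
-- def __get_token_strings(tokenized_text, tagged_lemmas):
--     """Search-and-split re-implementation: repeatedly find the next lemma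
--     containing '/' in the remaining suffix and split off that segment."""
--     token_strings = tokenized_text.split(' ')
--     lemma_strings = tagged_lemmas.split(' ')
--     assert len(token_strings) == len(lemma_strings), (
--         "Tokens do not match tags")
--
--     final_token_strings = []
--     final_lemma_strings = []
--     rest_tokens = token_strings
--     rest_lemmas = lemma_strings
--     while rest_lemmas:
--         j = next((i for i, lemma in enumerate(rest_lemmas) if '/' in lemma),
--                  None)
--         if j is None:
--             break
--         final_token_strings.append(' '.join(rest_tokens[:j + 1]))
--         final_lemma_strings.append(' '.join(rest_lemmas[:j + 1]))
--         rest_tokens = rest_tokens[j + 1:]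
--         rest_lemmas = rest_lemmas[j + 1:]
--     return final_token_strings, final_lemma_strings
-- ===== Notes on version B (the rewrite author's own statement) =====
-- stated objective: alternative
-- what changed: A's single accumulate-and-flush pass (with an all-'/' fast path) is replaced by a search-and-split loop that repeatedly finds the index of the next '/'-containing lemma in the remaining suffix and slices off one segment, with no per-token accumulators and no fast path.
import Mathlib
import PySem

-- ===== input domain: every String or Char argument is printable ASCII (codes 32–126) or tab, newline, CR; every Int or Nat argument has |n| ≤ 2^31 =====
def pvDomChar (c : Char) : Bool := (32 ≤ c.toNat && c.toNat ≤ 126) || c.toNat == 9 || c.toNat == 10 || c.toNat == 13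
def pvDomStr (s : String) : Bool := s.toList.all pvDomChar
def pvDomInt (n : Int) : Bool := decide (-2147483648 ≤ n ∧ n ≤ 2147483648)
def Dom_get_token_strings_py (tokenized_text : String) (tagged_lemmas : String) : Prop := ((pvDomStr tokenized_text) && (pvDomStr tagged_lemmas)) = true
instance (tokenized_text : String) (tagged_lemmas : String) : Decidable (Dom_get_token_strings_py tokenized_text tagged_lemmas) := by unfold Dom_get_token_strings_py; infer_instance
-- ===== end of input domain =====

-- B replaces A's accumulate-and-flush pass (plus its all-'/' fast path) by a
-- search-and-split loop: find the next '/'-lemma in the remaining suffix and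
-- slice off one segment; objective: alternative.

-- s.split(' '): the separator " " is a nonempty literal, so Python never
-- raises and PySem.Str.split? is always `some`; getD [] is unreachable.
def pvSplitSp (s : String) : List String := (PySem.Str.split? s " ").getD []

-- ===== PORT A =====
-- A's for-loop: state = (final_token_strings, final_lemma_strings) and
-- (tokens_to_accumulate, lemmas_to_accumulate), iterating over the zip
def pvLoopA : List (String × String) → List String × List String →
    List String × List String → List String × List String
  | [], (fT, fL), _ => (fT, fL)
  | (tok, lem) :: rest, (fT, fL), (aT, aL) =>
    let aT' := aT ++ [tok]
    let aL' := aL ++ [lem]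
    if PySem.Str.isIn "/" lem then
      pvLoopA rest
        (fT ++ [PySem.Str.join " " aT'], fL ++ [PySem.Str.join " " aL']) ([], [])
    else
      pvLoopA rest (fT, fL) (aT', aL')

def get_token_strings_py (tokenized_text : String) (tagged_lemmas : String) :
    List String × List String :=
  let token_strings := pvSplitSp tokenized_text
  let lemma_strings := pvSplitSp tagged_lemmas
  -- the assert's failing inputs are excluded by Pre_
  if lemma_strings.all (fun lem => PySem.Str.isIn "/" lem) then
    (token_strings, lemma_strings)
  else
    pvLoopA (token_strings.zip lemma_strings) ([], []) ([], [])

-- ===== PORT B =====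
-- B's while-loop: index of the next '/'-lemma in the remaining suffix
-- (next(... enumerate ...)), split off that segment, continue on the rest
def pvLoopB : List String → List String → List String × List String →
    List String × List String
  | _, [], (fT, fL) => (fT, fL)   -- while rest_lemmas: loop exit
  | rest_t, l0 :: rest_l', (fT, fL) =>
    match (l0 :: rest_l').findIdx? (fun lem => PySem.Str.isIn "/" lem) with
    | none => (fT, fL)            -- j is None: break
    | some j =>
      pvLoopB (rest_t.drop (j + 1)) ((l0 :: rest_l').drop (j + 1))
        (fT ++ [PySem.Str.join " " (rest_t.take (j + 1))],
         fL ++ [PySem.Str.join " " ((l0 :: rest_l').take (j + 1))])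
  termination_by rest_t rest_l _ => rest_l.length
  decreasing_by simp [List.length_drop]

def get_token_strings_py_alt (tokenized_text : String) (tagged_lemmas : String) :
    List String × List String :=
  let token_strings := pvSplitSp tokenized_text
  let lemma_strings := pvSplitSp tagged_lemmas
  pvLoopB token_strings lemma_strings ([], [])

-- ===== PRECONDITION & SPEC =====
-- Pre_ excludes exactly the inputs on which A's assert raises AssertionError:
-- the two space-splits have the same number of pieces, i.e. the two strings
-- contain the same number of ' ' characters.
def Pre_get_token_strings_py (tokenized_text : String) (tagged_lemmas : String) : Prop :=
  tokenized_text.toList.count ' ' = tagged_lemmas.toList.count ' ' 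
instance (tokenized_text : String) (tagged_lemmas : String) :
    Decidable (Pre_get_token_strings_py tokenized_text tagged_lemmas) := by
  unfold Pre_get_token_strings_py; infer_instance

def pvWitness_get_token_strings_py : String × String := ("a b/c d", "x n/n v/v")

def Spec_get_token_strings_py (tokenized_text : String) (tagged_lemmas : String) (out : List String × List String) : Prop := out = get_token_strings_py_alt tokenized_text tagged_lemmas
instance (tokenized_text : String) (tagged_lemmas : String) (out : List String × List String) : Decidable (Spec_get_token_strings_py tokenized_text tagged_lemmas out) := by unfold Spec_get_token_strings_py; infer_instance

-- ===== CLAIM (what is proved, stated in full; the proofs are below) =====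
def Claim_equal_get_token_strings_py : Prop := ∀ (tokenized_text : String) (tagged_lemmas : String), Dom_get_token_strings_py tokenized_text tagged_lemmas → Pre_get_token_strings_py tokenized_text tagged_lemmas → Spec_get_token_strings_py tokenized_text tagged_lemmas (get_token_strings_py tokenized_text tagged_lemmas)

-- ===== LEMMAS AND PROOFS =====

theorem pvJoin_singleton (s : String) : PySem.Str.join " " [s] = s := by
  simp [PySem.Str.join, PySem.Chars.join_singleton]

-- each ' ' starts one more piece: length of the fuelled splitter, enough fuel
theorem pvGo_len (fuel : Nat) : ∀ (l cur : List Char) (acc : List (List Char)),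
    l.length < fuel →
    (PySem.Chars.splitOn.go [' '] fuel l cur acc).length = acc.length + 1 + l.count ' ' := by
  induction fuel with
  | zero => intro l cur acc h; exact absurd h (by omega)
  | succ f ih =>
    intro l cur acc h
    cases l with
    | nil => simp [PySem.Chars.splitOn.go]
    | cons c rest =>
      rw [PySem.Chars.splitOn.go]
      by_cases hc : c = ' '
      · subst hc
        rw [if_pos (by simp [List.isPrefixOf])]
        have hlt : rest.length < f := by simpa using Nat.lt_of_succ_lt_succ h
        simp only [List.length_singleton, List.drop_succ_cons, List.drop_zero]
        rw [ih _ _ _ hlt]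
        simp [List.count_cons]
        omega
      · rw [if_neg (by simp [List.isPrefixOf, hc]; exact fun hx => absurd hx.symm hc)]
        have hlt : rest.length < f := by simpa using Nat.lt_of_succ_lt_succ h
        rw [ih _ _ _ hlt]
        simp [List.count_cons, hc]

theorem pvSplitSp_length (s : String) : (pvSplitSp s).length = s.toList.count ' ' + 1 := by
  unfold pvSplitSp
  have hsep : (" " : String).toList = [' '] := rfl
  simp only [PySem.Str.split?, PySem.Chars.split?, hsep]
  rw [if_neg (by simp)]
  simp only [Option.map_some, Option.getD_some, List.length_map]
  rw [PySem.Chars.splitOn]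
  rw [pvGo_len _ _ _ _ (by omega)]
  simp [Nat.add_comm]

-- one-step unfolding of B's loop, uniform in the lemma list
theorem pvLoopB_eq (rest_t rest_l fT fL : List String) :
    pvLoopB rest_t rest_l (fT, fL) =
      match rest_l.findIdx? (fun lem => PySem.Str.isIn "/" lem) with
      | none => (fT, fL)
      | some j =>
        pvLoopB (rest_t.drop (j + 1)) (rest_l.drop (j + 1))
          (fT ++ [PySem.Str.join " " (rest_t.take (j + 1))],
           fL ++ [PySem.Str.join " " (rest_l.take (j + 1))]) := by
  cases rest_l with
  | nil => simp [pvLoopB]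
  | cons l0 rl => rw [pvLoopB]

theorem pvLoopB_none (rest_t rest_l fT fL : List String)
    (h : rest_l.findIdx? (fun lem => PySem.Str.isIn "/" lem) = none) :
    pvLoopB rest_t rest_l (fT, fL) = (fT, fL) := by
  rw [pvLoopB_eq, h]

theorem pvLoopB_some (rest_t rest_l fT fL : List String) (j : Nat)
    (h : rest_l.findIdx? (fun lem => PySem.Str.isIn "/" lem) = some j) :
    pvLoopB rest_t rest_l (fT, fL) =
      pvLoopB (rest_t.drop (j + 1)) (rest_l.drop (j + 1))
        (fT ++ [PySem.Str.join " " (rest_t.take (j + 1))],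
         fL ++ [PySem.Str.join " " (rest_l.take (j + 1))]) := by
  rw [pvLoopB_eq, h]

theorem pvDropLen {alpha : Type} (xs ys : List alpha) (k : Nat) :
    (xs ++ ys).drop (xs.length + k) = ys.drop k := by
  simp [List.drop_append, List.drop_eq_nil_of_le, Nat.add_sub_cancel_left]

theorem pvTakeLen {alpha : Type} (xs ys : List alpha) (k : Nat) :
    (xs ++ ys).take (xs.length + k) = xs ++ ys.take k := by
  simp [List.take_append, Nat.add_sub_cancel_left]

-- findIdx? of an all-false prefix followed by a hit
theorem pvFindIdx_prefix (p : String → Bool) (aL rest : List String) (l : String)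
    (hall : ∀ x ∈ aL, p x = false) (hl : p l = true) :
    (aL ++ l :: rest).findIdx? p = some aL.length := by
  induction aL with
  | nil => simp [List.findIdx?_cons, hl]
  | cons a t ih =>
    have ha : p a = false := hall a (by simp)
    simp [List.findIdx?_cons, ha, ih (fun x hx => hall x (by simp [hx]))]

-- B's loop on lists whose lemmas all contain '/': one singleton segment each
theorem pvLoopB_all (ls : List String) : ∀ (ts fT fL : List String),
    ts.length = ls.length →
    (∀ l ∈ ls, PySem.Str.isIn "/" l = true) →
    pvLoopB ts ls (fT, fL) = (fT ++ ts, fL ++ ls) := by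
  induction ls with
  | nil =>
    intro ts fT fL hlen _
    have : ts = [] := List.eq_nil_of_length_eq_zero hlen
    subst this
    simp [pvLoopB]
  | cons l ls' ih =>
    intro ts fT fL hlen hall
    cases ts with
    | nil => simp at hlen
    | cons t ts' =>
      have hl : PySem.Str.isIn "/" l = true := hall l (by simp)
      rw [pvLoopB_some _ _ _ _ 0 (by simp only [List.findIdx?_cons, hl]; rfl)]
      simp only [List.take_succ_cons, List.take_zero, List.drop_succ_cons,
        List.drop_zero]
      rw [pvJoin_singleton, pvJoin_singleton,
        ih ts' (fT ++ [t]) (fL ++ [l]) (by simpa using hlen)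
          (fun x hx => hall x (by simp [hx]))]
      simp

-- main bridge: A's loop with pending accumulators = B's loop on acc ++ rest
theorem pvLoop_eq (ls : List String) : ∀ (ts aT aL fT fL : List String),
    ts.length = ls.length → aT.length = aL.length →
    (∀ l ∈ aL, PySem.Str.isIn "/" l = false) →
    pvLoopA (ts.zip ls) (fT, fL) (aT, aL) = pvLoopB (aT ++ ts) (aL ++ ls) (fT, fL) := by
  induction ls with
  | nil =>
    intro ts aT aL fT fL hlen _ hall
    have : ts = [] := List.eq_nil_of_length_eq_zero hlen
    subst this
    rw [pvLoopB_none _ _ _ _ (by rw [List.findIdx?_eq_none_iff]; simpa using hall)]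
    simp [pvLoopA]
  | cons l ls' ih =>
    intro ts aT aL fT fL hlen haa hall
    cases ts with
    | nil => simp at hlen
    | cons t ts' =>
      simp only [List.zip_cons_cons, pvLoopA]
      by_cases hl : PySem.Str.isIn "/" l = true
      · rw [if_pos hl]
        rw [ih ts' [] [] _ _ (by simpa using hlen) rfl (by simp)]
        rw [pvLoopB_some _ _ _ _ aL.length (pvFindIdx_prefix _ aL _ l hall hl)]
        have h2 : (aT ++ t :: ts').drop (aL.length + 1) = ts' := by
          rw [← haa]; simpa using pvDropLen aT (t :: ts') 1
        have h3 : (aT ++ t :: ts').take (aL.length + 1) = aT ++ [t] := by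
          rw [← haa]; simpa using pvTakeLen aT (t :: ts') 1
        have h4 : (aL ++ l :: ls').drop (aL.length + 1) = ls' := by
          simpa using pvDropLen aL (l :: ls') 1
        have h5 : (aL ++ l :: ls').take (aL.length + 1) = aL ++ [l] := by
          simpa using pvTakeLen aL (l :: ls') 1
        rw [h2, h3, h4, h5]
        simp only [List.nil_append]
      · rw [if_neg hl]
        have hlf : PySem.Str.isIn "/" l = false := by
          cases hx : PySem.Str.isIn "/" l
          · rfl
          · exact absurd hx hl
        rw [ih ts' (aT ++ [t]) (aL ++ [l]) _ _ (by simpa using hlen)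
          (by simp [haa])
          (fun x hx => by
            rcases List.mem_append.mp hx with h | h
            · exact hall x h
            · simp at h; subst h; exact hlf)]
        simp

-- ===== VERDICT (by name: the statement is the Claim_ definition above) =====
theorem get_token_strings_py_spec : Claim_equal_get_token_strings_py := by
  intro tt tl _ hpre0
  unfold Pre_get_token_strings_py at hpre0
  have hpre : (pvSplitSp tt).length = (pvSplitSp tl).length := by
    rw [pvSplitSp_length, pvSplitSp_length, hpre0]
  unfold Spec_get_token_strings_py get_token_strings_py get_token_strings_py_alt
  simp only
  split
  · next hall =>
    rw [pvLoopB_all _ _ _ _ hpre (by simpa [List.all_eq_true] using hall)]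
    simp
  · simpa using pvLoop_eq _ _ [] [] [] [] hpre rfl (by simp)
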